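-- pv_equiv track=rewrite | github.com/rushirg/practice-problems | HackerRank/Maximum_Streaks.py | getMaxHeads
-- ===== SOURCE A (Python) =====
-- def getMaxHeads(arr, n):
--     count = 0
--     result = 0
--     for i in range(0, n):
--         if (arr[i] == "Tails"):
--             count = 0
--         else:
--             count+= 1
--             result = max(result, count)
--     return result
-- ===== SOURCE B (Python) =====
-- def getMaxHeads(arr, n):
--     # Separator-gap method: record the indices of the "Tails" separators among
--     # the first n tosses, pad with sentinels -1 and m, and the answer is the
--     # largest distance between consecutive separators minus one.
--     m = max(n, 0)
--     cuts = [-1] + [i for i in range(m) if arr[i] == "Tails"] + [m]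
--     return max(b - a - 1 for a, b in zip(cuts, cuts[1:]))
-- ===== Notes on version B (the rewrite author's own statement) =====
-- stated objective: alternative
-- what changed: A counts run lengths online with a running counter and running max; B never counts runs: it collects the index positions of the Tails separators, pads them with sentinels -1 and m, and returns the largest difference between consecutive separator positions minus one.
import Mathlib
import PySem

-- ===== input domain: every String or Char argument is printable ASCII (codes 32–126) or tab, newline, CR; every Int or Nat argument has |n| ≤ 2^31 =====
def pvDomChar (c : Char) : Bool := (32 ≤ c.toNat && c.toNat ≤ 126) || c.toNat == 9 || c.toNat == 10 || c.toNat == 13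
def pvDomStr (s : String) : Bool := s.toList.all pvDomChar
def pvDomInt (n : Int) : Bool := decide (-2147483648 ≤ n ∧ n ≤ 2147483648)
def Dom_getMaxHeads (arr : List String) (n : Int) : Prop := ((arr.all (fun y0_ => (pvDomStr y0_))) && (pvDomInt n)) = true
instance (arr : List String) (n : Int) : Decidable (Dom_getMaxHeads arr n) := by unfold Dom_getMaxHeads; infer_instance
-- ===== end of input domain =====

-- B replaces A's online run counter by the separator-gap method: it collects the
-- indices of the "Tails" separators, pads with sentinels -1 and m, and returns
-- the largest difference between consecutive separator positions minus one.

-- ===== PORT A =====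
-- for i in range(0, n): if arr[i] == "Tails": count = 0 else: count += 1; result = max(result, count)
-- arr[i] is PySem.List.pyGet?; none (= IndexError) is excluded by Pre_, state kept unchanged there.
def getMaxHeads (arr : List String) (n : Int) : Int :=
  let st := (PySem.List.pyRange 0 n 1).foldl
    (fun (st : Int × Int) i =>
      match PySem.List.pyGet? arr i with
      | some x => if x == "Tails" then (0, st.2) else (st.1 + 1, max st.2 (st.1 + 1))
      | none => st)
    (0, 0)
  st.2

-- ===== PORT B =====
-- m = max(n, 0); cuts = [-1] + [i for i in range(m) if arr[i] == "Tails"] + [m]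
-- return max(b - a - 1 for a, b in zip(cuts, cuts[1:]))
def getMaxHeads_alt (arr : List String) (n : Int) : Int :=
  let m := max n 0
  let cuts := [(-1 : Int)] ++
    ((PySem.List.pyRange 0 m 1).filter
      (fun i => match PySem.List.pyGet? arr i with   -- arr[i]; none = IndexError, excluded by Pre_
                | some x => x == "Tails"
                | none => false)) ++ [m]
  let gaps := (cuts.zip (PySem.List.slice cuts (some 1) none)).map (fun p => p.2 - p.1 - 1)
  (PySem.List.max? gaps (fun y => y)).getD 0   -- max(generator); nonempty since cuts has ≥ 2 elements

-- ===== PRECONDITION & SPEC =====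
-- A indexes arr[i] for every i in range(n): it raises IndexError iff n > len(arr).
def Pre_getMaxHeads (arr : List String) (n : Int) : Prop := n ≤ (arr.length : Int)
instance (arr : List String) (n : Int) : Decidable (Pre_getMaxHeads arr n) := by
  unfold Pre_getMaxHeads; infer_instance

def pvWitness_getMaxHeads : List String × Int :=
  (["Heads", "Heads", "Tails", "Heads"], 4)

def Spec_getMaxHeads (arr : List String) (n : Int) (out : Int) : Prop := out = getMaxHeads_alt arr n
instance (arr : List String) (n : Int) (out : Int) : Decidable (Spec_getMaxHeads arr n out) := by
  unfold Spec_getMaxHeads; infer_instance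

-- ===== CLAIM (what is proved, stated in full; the proofs are below) =====
def Claim_equal_getMaxHeads : Prop := ∀ (arr : List String) (n : Int), Dom_getMaxHeads arr n → Pre_getMaxHeads arr n → Spec_getMaxHeads arr n (getMaxHeads arr n)

-- ===== LEMMAS AND PROOFS =====

-- the max run length of the partition of xs into maximal non-Tails runs,
-- a current run of length c being open
def maxRuns (c : Int) : List String → Int
  | [] => c
  | x :: t => if x = "Tails" then max c (maxRuns 0 t) else maxRuns (c + 1) t

theorem le_maxRuns (xs : List String) (c : Int) : c ≤ maxRuns c xs := by
  induction xs generalizing c with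
  | nil => simp [maxRuns]
  | cons x t ih =>
    simp only [maxRuns]
    split_ifs
    · exact le_max_left _ _
    · exact le_trans (by omega) (ih (c + 1))

-- A's step as a function of the element
def aStep (st : Int × Int) (x : String) : Int × Int :=
  if x == "Tails" then (0, st.2) else (st.1 + 1, max st.2 (st.1 + 1))

theorem aFold (xs : List String) (c r : Int) (hc : 0 ≤ c) (hcr : c ≤ r) :
    (xs.foldl aStep (c, r)).2 = max r (maxRuns c xs) := by
  induction xs generalizing c r with
  | nil => simp [maxRuns]; omega
  | cons x t ih =>
    by_cases hx : x = "Tails"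
    · simp only [List.foldl_cons, aStep, hx, maxRuns, beq_self_eq_true, if_true]
      rw [ih 0 r le_rfl (le_trans hc hcr)]
      omega
    · have hx' : (x == "Tails") = false := by simp [hx]
      simp only [List.foldl_cons, aStep, maxRuns, hx', if_neg hx, Bool.false_eq_true, if_false]
      rw [ih (c + 1) (max r (c + 1)) (by omega) (le_max_right _ _)]
      have := le_maxRuns t (c + 1)
      omega

theorem take_bridge (arr : List String) (m : Nat) (hm : m ≤ arr.length) :
    (List.range m).foldl
      (fun (st : Int × Int) (k : Nat) =>
        match PySem.List.pyGet? arr (k : Int) with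
        | some x => if x == "Tails" then (0, st.2) else (st.1 + 1, max st.2 (st.1 + 1))
        | none => st) (0, 0)
    = (arr.take m).foldl aStep (0, 0) := by
  induction m with
  | zero => simp
  | succ m ih =>
    have hm' : m ≤ arr.length := by omega
    have hlt : m < arr.length := by omega
    rw [List.range_succ, List.foldl_append, ih hm']
    rw [List.take_add_one]
    simp only [List.foldl_append, List.foldl_cons, List.foldl_nil]
    rw [PySem.List.pyGet?_natCast]
    simp [List.getElem?_eq_getElem hlt, aStep]

-- the list of run lengths of xs (a run of length c open), in order
def gRuns (c : Int) : List String → List Int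
  | [] => [c]
  | x :: t => if x = "Tails" then c :: gRuns 0 t else gRuns (c + 1) t

theorem foldl_max_comm (l : List Int) (a b : Int) :
    l.foldl max (max a b) = max a (l.foldl max b) := by
  induction l generalizing a b with
  | nil => rfl
  | cons x t ih =>
    simp only [List.foldl_cons]
    rw [max_assoc, ih]

theorem max?_gRuns (xs : List String) (c : Int) :
    PySem.List.max? (gRuns c xs) (fun y => y) = some (maxRuns c xs) := by
  induction xs generalizing c with
  | nil => simp [gRuns, maxRuns, PySem.List.max?_id_cons]
  | cons x t ih =>
    by_cases hx : x = "Tails"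
    · simp only [gRuns, maxRuns, if_pos hx]
      rcases hg : gRuns 0 t with _ | ⟨y, ys⟩
      · have := ih 0; rw [hg] at this
        simp [PySem.List.max?] at this
      · have h1 := ih 0
        rw [hg, PySem.List.max?_id_cons] at h1
        rw [PySem.List.max?_id_cons]
        simp only [List.foldl_cons]
        rw [foldl_max_comm ys c y]
        have h1' : ys.foldl max y = maxRuns 0 t := Option.some.inj h1
        rw [h1']
    · simp only [gRuns, maxRuns, if_neg hx]
      exact ih (c + 1)

-- indices (offset b) of the "Tails" elements of xs, in order
def tailsIdx (b : Int) : List String → List Int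
  | [] => []
  | x :: t => if x = "Tails" then b :: tailsIdx (b + 1) t else tailsIdx (b + 1) t

theorem tailsIdx_append (xs : List String) (x : String) (b : Int) :
    tailsIdx b (xs ++ [x]) =
      tailsIdx b xs ++ (if x = "Tails" then [b + xs.length] else []) := by
  induction xs generalizing b with
  | nil => simp [tailsIdx]
  | cons y t ih =>
    by_cases hy : y = "Tails" <;>
      simp [tailsIdx, hy, ih (b + 1)] <;> split_ifs <;> simp <;> ring

-- the gap differences of the padded cut list a :: l ++ [e]
def diffs (a : Int) : List Int → Int → List Int
  | [], e => [e - a - 1]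
  | x :: t, e => (x - a - 1) :: diffs x t e

theorem zip_diffs (l : List Int) (a e : Int) :
    ((a :: (l ++ [e])).zip (l ++ [e])).map (fun p => p.2 - p.1 - 1) = diffs a l e := by
  induction l generalizing a with
  | nil => simp [diffs]
  | cons x t ih => simpa [diffs] using ih x

theorem diffs_gRuns (xs : List String) (b c : Int) :
    diffs (b - 1 - c) (tailsIdx b xs) (b + xs.length) = gRuns c xs := by
  induction xs generalizing b c with
  | nil => simp [tailsIdx, diffs, gRuns]; ring
  | cons x t ih =>
    by_cases hx : x = "Tails"
    · simp only [tailsIdx, gRuns, if_pos hx, diffs, List.length_cons]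
      rw [List.cons.injEq]
      exact ⟨by ring, by convert ih (b + 1) 0 using 2 <;> push_cast <;> ring⟩
    · simp only [tailsIdx, gRuns, if_neg hx, List.length_cons]
      convert ih (b + 1) (c + 1) using 2 <;> push_cast <;> ring

-- B's filter over range(m) is exactly tailsIdx 0 of the first m tosses
theorem filter_bridge (arr : List String) (m : Nat) (hm : m ≤ arr.length) :
    ((List.range m).map (fun (k : Nat) => ((0 : Int) + k))).filter
      (fun i => match PySem.List.pyGet? arr i with
                | some x => x == "Tails"
                | none => false)
    = tailsIdx 0 (arr.take m) := by
  induction m with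
  | zero => simp [tailsIdx]
  | succ m ih =>
    have hm' : m ≤ arr.length := by omega
    have hlt : m < arr.length := by omega
    rw [List.range_succ, List.map_append, List.filter_append, ih hm']
    rw [List.take_add_one]
    simp only [List.getElem?_eq_getElem hlt, Option.toList_some]
    rw [tailsIdx_append]
    simp only [List.length_take, min_eq_left hm', List.map_cons, List.map_nil,
      List.filter_cons, List.filter_nil]
    rw [show ((0 : Int) + (m : Int)) = ((m : Nat) : Int) by ring, PySem.List.pyGet?_natCast]
    simp only [List.getElem?_eq_getElem hlt]
    by_cases hx : arr[m] = "Tails" <;> simp [hx]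

-- ===== VERDICT (by name: the statement is the Claim_ definition above) =====
theorem getMaxHeads_spec : Claim_equal_getMaxHeads := by
  intro arr n _ hpre
  unfold Spec_getMaxHeads getMaxHeads getMaxHeads_alt Pre_getMaxHeads at *
  -- A's loop over range(n) becomes a fold over arr.take n.toNat
  rw [PySem.List.pyRange_one]
  simp only [Int.sub_zero, List.foldl_map, Int.zero_add]
  rw [take_bridge arr n.toNat (by omega)]
  -- B's range(max n 0) has the same toNat
  have hmt : (max n 0).toNat = n.toNat := by omega
  have hm : max n 0 = ((n.toNat : Nat) : Int) := by omega
  rw [PySem.List.pyRange_one]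
  simp only [Int.sub_zero, hmt]
  rw [filter_bridge arr n.toNat (by omega)]
  rw [PySem.List.slice_from_one]
  -- cuts = -1 :: (tailsIdx ++ [m]) and its tail
  set l := tailsIdx 0 (arr.take n.toNat) with hl
  have hshape : [(-1 : Int)] ++ l ++ [max n 0] = (-1 : Int) :: (l ++ [max n 0]) := by simp
  rw [hshape, List.tail_cons, zip_diffs]
  have hlen : ((arr.take n.toNat).length : Int) = max n 0 := by
    simp [List.length_take]; omega
  have hd : diffs (-1) l (max n 0) = gRuns 0 (arr.take n.toNat) := by
    have := diffs_gRuns (arr.take n.toNat) 0 0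
    rw [hlen] at this
    simpa using this
  rw [hd, max?_gRuns, aFold _ 0 0 le_rfl le_rfl]
  have := le_maxRuns (arr.take n.toNat) 0
  simp only [Option.getD_some]
  omega
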